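-- pv_equiv track=rewrite | github.com/SlimRunner/advent-of-code | year-2021/21-day/solve.py | warmupWin
-- ===== SOURCE A (Python) =====
-- def warmupWin(p1, p2):
--     turn = True
--     v1 = 0
--     v2 = 0
--     i = 0
--     while v1 < 1000 and v2 < 1000:
--         i += 1
--         if turn:
--             p1 = (p1 + die100(i)) % 10
--             v1 += p1 + 1
--             turn = False
--         else:
--             p2 = (p2 + die100(i)) % 10
--             v2 += p2 + 1
--             turn = True
--         vw = v1 if v1 < 1000 else v2
--     return i * 3 * vw
--
-- def die100(n):
--     return 9 * n - 3
-- ===== SOURCE B (Python) =====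
-- def warmupWin(p1, p2):
--     pos = [p1 % 10, p2 % 10]
--     sc = [0, 0]
--     face = 1
--     rolls = 0
--     cur = 0
--     while True:
--         s = 0
--         for _ in range(3):
--             s += face
--             face = face % 100 + 1
--             rolls += 1
--         pos[cur] = (pos[cur] + s) % 10
--         sc[cur] += pos[cur] + 1
--         if sc[cur] >= 1000:
--             return rolls * sc[1 - cur]
--         cur = 1 - cur
-- ===== Notes on version B (the rewrite author's own statement) =====
-- stated objective: alternative
-- what changed: B replaces A's closed-form die formula die100(i)=9i-3 by an explicit deterministic die (a face counter cycling 1..100 rolled three times per turn with a running roll count) and keeps both players' positions and scores in lists, alternating by index, returning roll_count * loser_score.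
import Mathlib
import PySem

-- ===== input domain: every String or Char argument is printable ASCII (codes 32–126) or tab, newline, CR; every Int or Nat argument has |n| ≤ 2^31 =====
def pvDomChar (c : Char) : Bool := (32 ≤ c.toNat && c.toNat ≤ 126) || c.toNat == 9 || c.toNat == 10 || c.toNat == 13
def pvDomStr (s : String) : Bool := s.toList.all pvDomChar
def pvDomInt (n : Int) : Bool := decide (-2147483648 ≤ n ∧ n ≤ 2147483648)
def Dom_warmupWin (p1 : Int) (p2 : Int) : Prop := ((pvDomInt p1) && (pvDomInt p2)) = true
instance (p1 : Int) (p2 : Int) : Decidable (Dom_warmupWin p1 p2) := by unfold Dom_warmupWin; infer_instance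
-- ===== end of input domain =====

-- B replaces A's closed-form die100(i)=9i-3 by an explicit deterministic die (face counter cycling 1..100,
-- running roll count) and keeps positions pre-reduced mod 10; objective: alternative decomposition, same cost.

-- ===== PORT A =====
-- termination lemmas cited by name in the ports' decreasing_by blocks
theorem pvModTen_nonneg (a : Int) : 0 ≤ PySem.Int.mod a 10 := by
  rw [PySem.Int.mod_eq_emod_of_pos (a := a) (by omega)]
  exact Int.emod_nonneg _ (by omega)

theorem pvMeasA_left {m v1 v2 : Int} (hm : 0 ≤ m) (h1 : v1 < 1000) :
    (1000 - (v1 + (m + 1))).toNat + (1000 - v2).toNat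
      < (1000 - v1).toNat + (1000 - v2).toNat := by omega

theorem pvMeasA_right {m v1 v2 : Int} (hm : 0 ≤ m) (h2 : v2 < 1000) :
    (1000 - v1).toNat + (1000 - (v2 + (m + 1))).toNat
      < (1000 - v1).toNat + (1000 - v2).toNat := by omega

theorem pvMeasB_left {m sc0 sc1 : Int} (hm : 0 ≤ m) (h : ¬ 1000 ≤ sc0 + (m + 1)) :
    (1000 - (sc0 + (m + 1))).toNat + (1000 - sc1).toNat
      < (1000 - sc0).toNat + (1000 - sc1).toNat := by omega

theorem pvMeasB_right {m sc0 sc1 : Int} (hm : 0 ≤ m) (h : ¬ 1000 ≤ sc1 + (m + 1)) :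
    (1000 - sc0).toNat + (1000 - (sc1 + (m + 1))).toNat
      < (1000 - sc0).toNat + (1000 - sc1).toNat := by omega

def die100 (n : Int) : Int := 9 * n - 3

-- A's while loop: state (turn, p1, p2, v1, v2, i, vw); terminates because each iteration
-- raises the moving player's score by a positive amount (position after % 10 is ≥ 0).
def warmupWinLoop (turn : Bool) (p1 p2 v1 v2 i vw : Int) : Int :=
  if h : v1 < 1000 ∧ v2 < 1000 then
    if turn then
      let p1' := PySem.Int.mod (p1 + die100 (i + 1)) 10
      let v1' := v1 + (p1' + 1)
      warmupWinLoop false p1' p2 v1' v2 (i + 1) (if v1' < 1000 then v1' else v2)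
    else
      let p2' := PySem.Int.mod (p2 + die100 (i + 1)) 10
      let v2' := v2 + (p2' + 1)
      warmupWinLoop true p1 p2' v1 v2' (i + 1) (if v1 < 1000 then v1 else v2')
  else i * 3 * vw
termination_by (1000 - v1).toNat + (1000 - v2).toNat
decreasing_by
  · exact pvMeasA_left (pvModTen_nonneg _) h.1
  · exact pvMeasA_right (pvModTen_nonneg _) h.2

def warmupWin (p1 : Int) (p2 : Int) : Int :=
  warmupWinLoop true p1 p2 0 0 0 0   -- vw starts unused (the loop always runs at least once)

-- ===== PORT B =====
-- the inner 'for _ in range(3)' of Source B: accumulate s, advance the face, count rolls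
def roll3 : Nat → Int → Int → Int → Int × Int × Int
  | 0, s, face, rolls => (s, face, rolls)
  | n + 1, s, face, rolls => roll3 n (s + face) (PySem.Int.mod face 100 + 1) (rolls + 1)

def warmupWinAltLoop (pos0 pos1 sc0 sc1 face rolls cur : Int) : Int :=
  let r := roll3 3 0 face rolls
  let s := r.1
  let face' := r.2.1
  let rolls' := r.2.2
  if cur = 0 then
    let pos0' := PySem.Int.mod (pos0 + s) 10
    let sc0' := sc0 + (pos0' + 1)
    if 1000 ≤ sc0' then rolls' * sc1
    else warmupWinAltLoop pos0' pos1 sc0' sc1 face' rolls' (1 - cur)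
  else
    let pos1' := PySem.Int.mod (pos1 + s) 10
    let sc1' := sc1 + (pos1' + 1)
    if 1000 ≤ sc1' then rolls' * sc0
    else warmupWinAltLoop pos0 pos1' sc0 sc1' face' rolls' (1 - cur)
termination_by (1000 - sc0).toNat + (1000 - sc1).toNat
decreasing_by
  · exact pvMeasB_left (pvModTen_nonneg _) (by assumption)
  · exact pvMeasB_right (pvModTen_nonneg _) (by assumption)

def warmupWin_alt (p1 : Int) (p2 : Int) : Int :=
  warmupWinAltLoop (PySem.Int.mod p1 10) (PySem.Int.mod p2 10) 0 0 1 0 0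

-- ===== PRECONDITION & SPEC =====
def Spec_warmupWin (p1 : Int) (p2 : Int) (out : Int) : Prop := out = warmupWin_alt p1 p2
instance (p1 : Int) (p2 : Int) (out : Int) : Decidable (Spec_warmupWin p1 p2 out) := by unfold Spec_warmupWin; infer_instance

-- ===== CLAIM (what is proved, stated in full; the proofs are below) =====
def Claim_equal_warmupWin : Prop := ∀ (p1 : Int) (p2 : Int), Dom_warmupWin p1 p2 → Spec_warmupWin p1 p2 (warmupWin p1 p2)

-- ===== LEMMAS AND PROOFS =====

-- Invariant linking an entry state of A's loop (v1, v2 both < 1000) to B's loop state: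
-- positions agree mod 10, face = rolls % 100 + 1, rolls = 3*i, cur encodes turn.
lemma loop_eq_aux (n : Nat) :
    ∀ (p1 p2 v1 v2 i vw : Int) (turn : Bool),
      (1000 - v1).toNat + (1000 - v2).toNat ≤ n →
      v1 < 1000 → v2 < 1000 →
      warmupWinLoop turn p1 p2 v1 v2 i vw =
        warmupWinAltLoop (p1 % 10) (p2 % 10) v1 v2 ((3 * i) % 100 + 1) (3 * i)
          (if turn then 0 else 1) := by
  induction n with
  | zero =>
    intro p1 p2 v1 v2 i vw turn hn h1 h2
    omega
  | succ n ih =>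
    intro p1 p2 v1 v2 i vw turn hn h1 h2
    have hmod : ∀ a : Int, PySem.Int.mod a 10 = a % 10 := fun a =>
      PySem.Int.mod_eq_emod_of_pos (a := a) (by omega)
    have hmod100 : ∀ a : Int, PySem.Int.mod a 100 = a % 100 := fun a =>
      PySem.Int.mod_eq_emod_of_pos (a := a) (by omega)
    have hface : (((3 * i % 100 + 1) % 100 + 1) % 100 + 1) % 100 + 1
        = 3 * (i + 1) % 100 + 1 := by omega
    have hrolls : 3 * i + 1 + 1 + 1 = 3 * (i + 1) := by ring
    rw [warmupWinLoop, warmupWinAltLoop]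
    simp only [roll3, die100, hmod, hmod100]
    rw [dif_pos ⟨h1, h2⟩]
    cases turn with
    | true =>
      simp only [if_true, sub_zero]
      have hpp : (p1 % 10 + (0 + (3 * i % 100 + 1) + ((3 * i % 100 + 1) % 100 + 1) +
          (((3 * i % 100 + 1) % 100 + 1) % 100 + 1))) % 10
          = (p1 + (9 * (i + 1) - 3)) % 10 := by omega
      rw [hpp, hface, hrolls]
      by_cases hw : (1000:Int) ≤ v1 + ((p1 + (9 * (i + 1) - 3)) % 10 + 1)
      · rw [if_pos hw, warmupWinLoop,
          dif_neg (by omega :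
            ¬ (v1 + ((p1 + (9 * (i + 1) - 3)) % 10 + 1) < 1000 ∧ v2 < 1000)),
          if_neg (by omega : ¬ v1 + ((p1 + (9 * (i + 1) - 3)) % 10 + 1) < 1000)]
        ring
      · rw [if_neg hw,
          if_pos (by omega : v1 + ((p1 + (9 * (i + 1) - 3)) % 10 + 1) < 1000)]
        have hb : 0 ≤ (p1 + (9 * (i + 1) - 3)) % 10 ∧
            (p1 + (9 * (i + 1) - 3)) % 10 < 10 := by omega
        have hstep := ih ((p1 + (9 * (i + 1) - 3)) % 10) p2
          (v1 + ((p1 + (9 * (i + 1) - 3)) % 10 + 1)) v2 (i + 1)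
          (v1 + ((p1 + (9 * (i + 1) - 3)) % 10 + 1)) false
          (by omega) (by omega) h2
        have hdup : ((p1 + (9 * (i + 1) - 3)) % 10) % 10
            = (p1 + (9 * (i + 1) - 3)) % 10 := by omega
        rw [hdup] at hstep
        simp only [Bool.false_eq_true, if_false] at hstep
        rw [hstep]
    | false =>
      simp only [Bool.false_eq_true, if_false, one_ne_zero, sub_self]
      have hpp : (p2 % 10 + (0 + (3 * i % 100 + 1) + ((3 * i % 100 + 1) % 100 + 1) +
          (((3 * i % 100 + 1) % 100 + 1) % 100 + 1))) % 10
          = (p2 + (9 * (i + 1) - 3)) % 10 := by omega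
      rw [hpp, hface, hrolls, if_pos h1]
      by_cases hw : (1000:Int) ≤ v2 + ((p2 + (9 * (i + 1) - 3)) % 10 + 1)
      · rw [if_pos hw, warmupWinLoop,
          dif_neg (by omega :
            ¬ (v1 < 1000 ∧ v2 + ((p2 + (9 * (i + 1) - 3)) % 10 + 1) < 1000))]
        ring
      · rw [if_neg hw]
        have hb : 0 ≤ (p2 + (9 * (i + 1) - 3)) % 10 ∧
            (p2 + (9 * (i + 1) - 3)) % 10 < 10 := by omega
        have hstep := ih p1 ((p2 + (9 * (i + 1) - 3)) % 10) v1
          (v2 + ((p2 + (9 * (i + 1) - 3)) % 10 + 1)) (i + 1) v1 true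
          (by omega) h1 (by omega)
        have hdup : ((p2 + (9 * (i + 1) - 3)) % 10) % 10
            = (p2 + (9 * (i + 1) - 3)) % 10 := by omega
        rw [hdup] at hstep
        simp only [if_true] at hstep
        rw [hstep]

-- ===== VERDICT (by name: the statement is the Claim_ definition above) =====
theorem warmupWin_spec : Claim_equal_warmupWin := by
  intro p1 p2 _
  unfold Spec_warmupWin warmupWin warmupWin_alt
  have hmod : ∀ a : Int, PySem.Int.mod a 10 = a % 10 := fun a =>
    PySem.Int.mod_eq_emod_of_pos (a := a) (by omega)
  have h := loop_eq_aux 2000 p1 p2 0 0 0 0 true (by omega) (by omega) (by omega)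
  rw [h]
  norm_num [hmod]
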